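-- pv_equiv track=rewrite | github.com/dqgthb/algorithms | 1075/main.py | solve
-- ===== SOURCE A (Python) =====
-- def solve(N, F):
--     N = N // 100 * 100
--
--     for i in range(100):
--         if (N + i) % F == 0:
--             if i < 10:
--                 return "0" + str(i)
--             else:
--                 return str(i)
-- ===== SOURCE B (Python) =====
-- def solve(N, F):
--     N = N // 100 * 100
--     i = (-N) % abs(F)
--     if i < 100:
--         return "%02d" % i
-- ===== Notes on version B (the rewrite author's own statement) =====
-- stated objective: simpler
-- what changed: Replaces the linear scan of offsets 0..99 with a single modular-arithmetic computation i = (-N) % abs(F) after the same rounding N = N//100*100.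
-- outside the precondition, e.g. on solve(101, 1000): A returns None, B returns None; on solve(5, 0): A raises ZeroDivisionError, B raises ZeroDivisionError
import Mathlib
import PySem

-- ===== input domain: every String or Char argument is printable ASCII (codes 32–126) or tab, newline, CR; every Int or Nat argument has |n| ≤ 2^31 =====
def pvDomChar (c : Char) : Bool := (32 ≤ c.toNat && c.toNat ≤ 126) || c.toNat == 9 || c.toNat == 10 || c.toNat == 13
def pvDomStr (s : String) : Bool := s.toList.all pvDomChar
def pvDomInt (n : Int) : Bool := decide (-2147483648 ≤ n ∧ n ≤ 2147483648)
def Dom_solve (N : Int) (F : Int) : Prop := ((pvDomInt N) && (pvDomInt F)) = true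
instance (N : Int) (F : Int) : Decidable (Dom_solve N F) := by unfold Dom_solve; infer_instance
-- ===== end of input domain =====

-- B replaces A's linear scan over range(100) by one modular-arithmetic computation i = (-N) % abs(F) (simpler/faster by a constant factor); return-value equivalence on Pre_ (A mutates nothing).

-- ===== PORT A =====
-- the for-loop with early return; none = fell off the loop (Python returns None there, excluded by Pre_)
def solveLoop (N : Int) (F : Int) : List Int → Option String
  | [] => none
  | i :: rest =>
    if PySem.Int.mod (N + i) F = 0 then
      some (if i < 10 then "0" ++ PySem.Int.toStr i else PySem.Int.toStr i)
    else solveLoop N F rest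

def solve (N : Int) (F : Int) : String :=
  let N' := PySem.Int.floordiv N 100 * 100
  (solveLoop N' F (PySem.List.pyRange 0 100 1)).getD ""

-- ===== PORT B =====
def solve_alt (N : Int) (F : Int) : String :=
  let N' := PySem.Int.floordiv N 100 * 100
  let i := PySem.Int.mod (-N') |F|
  -- "%02d" % i zero-pads to width 2; exact for the 0 ≤ i produced here
  if i < 100 then (if i < 10 then "0" ++ PySem.Int.toStr i else PySem.Int.toStr i) else ""

-- ===== PRECONDITION & SPEC =====
-- Pre_ excludes F = 0 (A raises ZeroDivisionError) and the inputs where no offset below 100 works,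
-- on which A falls off the loop and returns None, not a string (B does the same in Python).
def Pre_solve (N : Int) (F : Int) : Prop :=
  F ≠ 0 ∧ PySem.Int.mod (-(PySem.Int.floordiv N 100 * 100)) |F| < 100
instance (N : Int) (F : Int) : Decidable (Pre_solve N F) := by unfold Pre_solve; infer_instance
def pvWitness_solve : Int × Int := (123, 7)

def Spec_solve (N : Int) (F : Int) (out : String) : Prop := out = solve_alt N F
instance (N : Int) (F : Int) (out : String) : Decidable (Spec_solve N F out) := by unfold Spec_solve; infer_instance

-- ===== CLAIM (what is proved, stated in full; the proofs are below) =====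
def Claim_equal_solve : Prop := ∀ (N : Int) (F : Int), Dom_solve N F → Pre_solve N F → Spec_solve N F (solve N F)

-- ===== LEMMAS AND PROOFS =====

-- A's loop, started anywhere at or below the first hit r, returns at r.
theorem loop_find (M F r : Int) (hr100 : r < 100)
    (hdiv : PySem.Int.mod (M + r) F = 0)
    (hnot : ∀ i, 0 ≤ i → i < r → PySem.Int.mod (M + i) F ≠ 0)
    (a : Int) (ha : 0 ≤ a) (har : a ≤ r) :
    solveLoop M F (PySem.List.pyRange a 100 1)
      = some (if r < 10 then "0" ++ PySem.Int.toStr r else PySem.Int.toStr r) := by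
  have ha100 : a < 100 := lt_of_le_of_lt har hr100
  rw [PySem.List.pyRange_one_cons ha100]
  by_cases heq : a = r
  · subst heq
    simp [solveLoop, hdiv]
  · have halt : a < r := lt_of_le_of_ne har heq
    rw [solveLoop, if_neg (hnot a ha halt)]
    exact loop_find M F r hr100 hdiv hnot (a + 1) (by omega) (by omega)
termination_by (r - a).toNat
decreasing_by omega

theorem solve_eq (N F : Int) (hP : Pre_solve N F) : solve N F = solve_alt N F := by
  obtain ⟨hF, hr100⟩ := hP
  set M : Int := PySem.Int.floordiv N 100 * 100 with hM
  set K : Int := |F| with hK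
  have hKpos : (0:Int) < K := abs_pos.mpr hF
  set r : Int := PySem.Int.mod (-M) K with hr
  have hrE : r = (-M) % K := by rw [hr, PySem.Int.mod_eq_emod_of_pos hKpos]
  have hr0 : 0 ≤ r := by rw [hrE]; exact Int.emod_nonneg _ (ne_of_gt hKpos)
  have hrK : r < K := by rw [hrE]; exact Int.emod_lt_of_pos _ hKpos
  have hdvdMr : K ∣ M + r := by
    refine ⟨-((-M) / K), ?_⟩
    rw [hrE, Int.emod_def]; ring
  have hdiv : PySem.Int.mod (M + r) F = 0 :=
    (PySem.Int.mod_eq_zero_iff_dvd _ _).mpr ((abs_dvd F _).mp (hK ▸ hdvdMr))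
  have hnot : ∀ i, 0 ≤ i → i < r → PySem.Int.mod (M + i) F ≠ 0 := by
    intro i hi0 hir h
    have hFd : F ∣ M + i := (PySem.Int.mod_eq_zero_iff_dvd _ _).mp h
    have hKd : K ∣ M + i := hK ▸ (abs_dvd F _).mpr hFd
    have hsub : K ∣ r - i := by
      have := dvd_sub hdvdMr hKd
      simpa [add_sub_add_left_eq_sub] using this
    have := Int.le_of_dvd (by omega) hsub
    omega
  have hloop := loop_find M F r hr100 hdiv hnot 0 le_rfl hr0
  simp only [solve, solve_alt]
  rw [← hM, ← hK, ← hr, hloop, if_pos hr100]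
  rfl

-- ===== VERDICT (by name: the statement is the Claim_ definition above) =====
theorem solve_spec : Claim_equal_solve := by
  intro N F _ hP
  unfold Spec_solve
  exact solve_eq N F hP
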